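-- pv_equiv track=rewrite | github.com/pysan-dev/pysan | pysan/derivatives.py | get_motif
-- ===== SOURCE A (Python) =====
-- def get_motif(sequences):
--     "Computes the motif for a given collection of sequences. A motif is a representative sequence for all sequences in a collection, with blank values (0) being those which are variable within the collection, and fixed values which are not. Motifs are related to the measure of synchrony (see `get_synchrony`) in that synchrony is equal to the number of non-blank elements in the motif."
--
--     shortest_sequence = min([len(s) for s in sequences])
--
--     same_elements = []
--     for position in range(shortest_sequence):
--
--         elements_at_this_position = []
--         for sequence in sequences:
--             elements_at_this_position.append(sequence[position])
--
--         if elements_at_this_position.count(elements_at_this_position[0]) == len(elements_at_this_position):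
--             same_elements.append(sequences[0][position])
--         else:
--             same_elements.append(0)
--
--     return same_elements
-- ===== SOURCE B (Python) =====
-- def get_motif(sequences):
--     """Pairwise reduction: fold each sequence into a running motif,
--     zeroing positions where the new sequence disagrees (zip truncates
--     to the shorter length, so the shortest sequence bounds the result)."""
--     motif = list(sequences[0])
--     for seq in sequences[1:]:
--         motif = [m if m == x else 0 for m, x in zip(motif, seq)]
--     return motif
-- ===== Notes on version B (the rewrite author's own statement) =====
-- stated objective: alternative
-- what changed: Replaces the per-position column scan (range over the shortest length, inner loop collecting a column and counting) by a pairwise left-fold over the sequences: the first sequence is the initial motif and each further sequence is merged element-wise, zeroing disagreeing positions; zip truncation handles the shortest length with no explicit min.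
-- outside the precondition, e.g. on get_motif([]): A raises ValueError, B raises IndexError
import Mathlib
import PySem

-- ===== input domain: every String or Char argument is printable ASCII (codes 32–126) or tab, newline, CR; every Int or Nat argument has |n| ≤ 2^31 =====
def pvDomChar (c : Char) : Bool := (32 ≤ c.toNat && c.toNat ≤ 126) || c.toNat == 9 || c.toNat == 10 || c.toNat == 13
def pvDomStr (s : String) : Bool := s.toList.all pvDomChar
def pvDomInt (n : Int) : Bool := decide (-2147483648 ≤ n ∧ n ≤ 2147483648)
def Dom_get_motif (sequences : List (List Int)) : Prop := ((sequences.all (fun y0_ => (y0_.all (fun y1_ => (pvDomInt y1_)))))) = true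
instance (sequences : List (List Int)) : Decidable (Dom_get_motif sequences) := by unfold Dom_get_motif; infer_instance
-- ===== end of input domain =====

-- B replaces A's per-position column scan by a pairwise left-fold merging the sequences (alternative decomposition; return-value equivalence only).

-- ===== PORT A =====
def get_motif (sequences : List (List Int)) : List Int :=
  match PySem.List.min? (sequences.map (fun s => (s.length : Int))) (fun x => x) with
  | none => []  -- min([]) raises ValueError; excluded by Pre_get_motif
  | some shortest_sequence =>
    (PySem.List.pyRange 0 shortest_sequence 1).map (fun position =>
      let elements_at_this_position := sequences.map (fun s => PySem.List.pyGetD s position 0)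
      if PySem.List.count elements_at_this_position (PySem.List.pyGetD elements_at_this_position 0 0)
           = elements_at_this_position.length then
        PySem.List.pyGetD (sequences.headD []) position 0
      else 0)

-- ===== PORT B =====
-- element-wise merge of two sequences: keep agreeing elements, zero the rest (zip truncates)
def pvMerge (a b : List Int) : List Int :=
  (a.zip b).map (fun p => if p.1 == p.2 then p.1 else 0)

def get_motif_alt (sequences : List (List Int)) : List Int :=
  match sequences with
  | [] => []  -- sequences[0] raises IndexError; excluded by Pre_get_motif
  | s0 :: rest => rest.foldl pvMerge s0

-- ===== PRECONDITION & SPEC =====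
-- Pre_ excludes exactly the empty input, on which both A (min([])) and B (sequences[0]) raise.
def Pre_get_motif (sequences : List (List Int)) : Prop := sequences ≠ []
instance (sequences : List (List Int)) : Decidable (Pre_get_motif sequences) := by unfold Pre_get_motif; infer_instance
def pvWitness_get_motif : List (List Int) := [[1, 2, 3], [1, 0, 3]]

def Spec_get_motif (sequences : List (List Int)) (out : List Int) : Prop := out = get_motif_alt sequences
instance (sequences : List (List Int)) (out : List Int) : Decidable (Spec_get_motif sequences out) := by unfold Spec_get_motif; infer_instance

-- ===== CLAIM (what is proved, stated in full; the proofs are below) =====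
def Claim_equal_get_motif : Prop := ∀ (sequences : List (List Int)), Dom_get_motif sequences → Pre_get_motif sequences → Spec_get_motif sequences (get_motif sequences)

-- ===== LEMMAS AND PROOFS =====

-- the minimum length (0 for the empty family), proof-side only
def pvMinLen (seqs : List (List Int)) : Nat :=
  ((PySem.List.min? (seqs.map (fun s => (s.length : Int))) (fun x => x)).getD 0).toNat

theorem pvMinLen_spec (seqs : List (List Int)) (hne : seqs ≠ []) :
    (∃ s ∈ seqs, s.length = pvMinLen seqs) ∧ (∀ s ∈ seqs, pvMinLen seqs ≤ s.length) := by
  rcases hmin : PySem.List.min? (seqs.map (fun s => (s.length : Int))) (fun x => x) with _ | m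
  · rw [PySem.List.min?_eq_none_iff, List.map_eq_nil_iff] at hmin
    exact absurd hmin hne
  · have hmem := PySem.List.min?_mem hmin
    have hmin' := PySem.List.min?_isMin hmin
    simp only [List.mem_map] at hmem
    obtain ⟨s0, hs0, hlen⟩ := hmem
    unfold pvMinLen
    rw [hmin]
    simp only [Option.getD_some]
    constructor
    · exact ⟨s0, hs0, by omega⟩
    · intro s hs
      have := hmin' (s.length : Int) (List.mem_map_of_mem hs)
      omega

theorem pvMinLen_eq (seqs : List (List Int)) (hne : seqs ≠ []) (v : Nat)
    (h1 : ∃ s ∈ seqs, s.length = v) (h2 : ∀ s ∈ seqs, v ≤ s.length) :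
    pvMinLen seqs = v := by
  obtain ⟨⟨sm, hsm, hm⟩, hall⟩ := pvMinLen_spec seqs hne
  obtain ⟨s0, hs0, h0⟩ := h1
  have := hall s0 hs0
  have := h2 sm hsm
  omega

theorem pvMerge_length (a b : List Int) : (pvMerge a b).length = min a.length b.length := by
  simp [pvMerge]

theorem foldl_merge_length (rest : List (List Int)) (m : List Int) :
    (rest.foldl pvMerge m).length = rest.foldl (fun n s => min n s.length) m.length := by
  induction rest generalizing m with
  | nil => rfl
  | cons r rest ih => simp [List.foldl_cons, ih, pvMerge_length]

theorem foldlMin_le (rest : List (List Int)) (k : Nat) :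
    rest.foldl (fun n s => min n s.length) k ≤ k ∧
    ∀ s ∈ rest, rest.foldl (fun n s => min n s.length) k ≤ s.length := by
  induction rest generalizing k with
  | nil => simp
  | cons r rest ih =>
    simp only [List.foldl_cons]
    obtain ⟨h1, h2⟩ := ih (min k r.length)
    refine ⟨by omega, ?_⟩
    intro s hs
    rcases List.mem_cons.mp hs with rfl | hs
    · omega
    · exact h2 s hs

theorem foldlMin_attained (rest : List (List Int)) (k : Nat) :
    rest.foldl (fun n s => min n s.length) k = k ∨
    ∃ s ∈ rest, rest.foldl (fun n s => min n s.length) k = s.length := by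
  induction rest generalizing k with
  | nil => left; rfl
  | cons r rest ih =>
    simp only [List.foldl_cons]
    rcases ih (min k r.length) with h | ⟨s, hs, h⟩
    · rcases Nat.le_total k r.length with hle | hle
      · left; rw [h]; omega
      · right; exact ⟨r, List.mem_cons_self, by rw [h]; omega⟩
    · right; exact ⟨s, List.mem_cons_of_mem _ hs, h⟩

theorem foldl_merge_length_eq (s0 : List Int) (rest : List (List Int)) :
    (rest.foldl pvMerge s0).length = pvMinLen (s0 :: rest) := by
  rw [foldl_merge_length]
  symm
  apply pvMinLen_eq _ (by simp)
  · rcases foldlMin_attained rest s0.length with h | ⟨s, hs, h⟩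
    · exact ⟨s0, List.mem_cons_self, h.symm⟩
    · exact ⟨s, List.mem_cons_of_mem _ hs, h.symm⟩
  · intro s hs
    obtain ⟨h1, h2⟩ := foldlMin_le rest s0.length
    rcases List.mem_cons.mp hs with rfl | hs
    · exact h1
    · exact h2 s hs

theorem pvMerge_getD (a b : List Int) (i : Nat) (ha : i < a.length) (hb : i < b.length) :
    (pvMerge a b).getD i 0 = if a.getD i 0 = b.getD i 0 then a.getD i 0 else 0 := by
  have hlen : i < (pvMerge a b).length := by rw [pvMerge_length]; omega
  rw [List.getD_eq_getElem _ _ hlen, List.getD_eq_getElem _ _ ha, List.getD_eq_getElem _ _ hb]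
  simp [pvMerge]

theorem foldl_merge_getD (rest : List (List Int)) (m : List Int) (i : Nat)
    (hi : i < (rest.foldl pvMerge m).length) :
    (rest.foldl pvMerge m).getD i 0 =
      if ∀ s ∈ rest, s.getD i 0 = m.getD i 0 then m.getD i 0 else 0 := by
  induction rest generalizing m with
  | nil => simp
  | cons r rest ih =>
    simp only [List.foldl_cons] at hi ⊢
    have hbound : i < (pvMerge m r).length := by
      rw [foldl_merge_length] at hi
      have := (foldlMin_le rest (pvMerge m r).length).1
      omega
    have hm : i < m.length := by rw [pvMerge_length] at hbound; omega
    have hr : i < r.length := by rw [pvMerge_length] at hbound; omega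
    rw [ih (pvMerge m r) hi, pvMerge_getD m r i hm hr]
    by_cases hmr : m.getD i 0 = r.getD i 0
    · simp only [if_pos hmr]
      by_cases hall : ∀ s ∈ rest, s.getD i 0 = m.getD i 0
      · have hcons : ∀ s ∈ r :: rest, s.getD i 0 = m.getD i 0 := by
          intro s hs
          rcases List.mem_cons.mp hs with rfl | hs
          · exact hmr.symm
          · exact hall s hs
        rw [if_pos hall, if_pos hcons]
      · have hncons : ¬ ∀ s ∈ r :: rest, s.getD i 0 = m.getD i 0 := by
          intro h
          exact hall fun s hs => h s (List.mem_cons_of_mem _ hs)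
        rw [if_neg hall, if_neg hncons]
    · simp only [if_neg hmr]
      have hncons : ¬ ∀ s ∈ r :: rest, s.getD i 0 = m.getD i 0 := by
        intro h
        exact hmr (h r List.mem_cons_self).symm
      rw [if_neg hncons]
      split <;> rfl

-- A as a map over the index range, with the column all-equal condition
theorem get_motif_eq_map (s0 : List Int) (rest : List (List Int)) :
    get_motif (s0 :: rest) =
      (List.range (pvMinLen (s0 :: rest))).map (fun i =>
        if ∀ s ∈ rest, s.getD i 0 = s0.getD i 0 then s0.getD i 0 else 0) := by
  set seqs := s0 :: rest with hseqs
  rcases hmin : PySem.List.min? (seqs.map (fun s => (s.length : Int))) (fun x => x) with _ | m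
  · rw [PySem.List.min?_eq_none_iff, List.map_eq_nil_iff] at hmin
    simp [hseqs] at hmin
  · have hm0 : 0 ≤ m := by
      have hmem := PySem.List.min?_mem hmin
      simp only [List.mem_map] at hmem
      obtain ⟨t0, _, hlen⟩ := hmem
      omega
    have hml : pvMinLen seqs = m.toNat := by unfold pvMinLen; rw [hmin]; rfl
    have hbound : ∀ s ∈ seqs, pvMinLen seqs ≤ s.length := (pvMinLen_spec seqs (by simp [hseqs])).2
    unfold get_motif
    rw [hmin]
    simp only []
    rw [PySem.List.pyRange_one, List.map_map, hml]
    have : (m - 0).toNat = m.toNat := by omega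
    rw [this, ← hml]
    refine List.map_congr_left ?_
    intro k hk
    have hk' : k < pvMinLen seqs := List.mem_range.mp hk
    simp only [Function.comp]
    have hcast : ((0 : Int) + (k : Int)) = ((k : Nat) : Int) := by omega
    rw [hcast]
    have helems : seqs.map (fun s => PySem.List.pyGetD s (k : Int) 0)
        = seqs.map (fun s => s.getD k 0) := by
      refine List.map_congr_left fun s _ => ?_
      exact PySem.List.pyGetD_natCast s k 0
    rw [helems]
    simp only [hseqs, List.map_cons, List.headD_cons, PySem.List.pyGetD_natCast,
      PySem.List.pyGetD_ofNat', List.getD_cons_zero, PySem.List.count_eq]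
    by_cases hc : ∀ s ∈ rest, s.getD k 0 = s0.getD k 0
    · rw [if_pos, if_pos hc]
      rw [List.count_eq_length]
      intro b hb
      rcases List.mem_cons.mp hb with rfl | hb
      · rfl
      · obtain ⟨s, hs, rfl⟩ := List.mem_map.mp hb
        exact (hc s hs).symm
    · rw [if_neg, if_neg hc]
      rw [List.count_eq_length]
      intro hcon
      refine hc fun s hs => ?_
      exact (hcon _ (List.mem_cons_of_mem _ (List.mem_map_of_mem hs))).symm

-- ===== VERDICT (by name: the statement is the Claim_ definition above) =====
theorem get_motif_spec : Claim_equal_get_motif := by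
  intro seqs _ hne
  unfold Spec_get_motif
  rcases seqs with _ | ⟨s0, rest⟩
  · exact absurd rfl hne
  · show get_motif (s0 :: rest) = get_motif_alt (s0 :: rest)
    rw [get_motif_eq_map]
    unfold get_motif_alt
    have hlenB := foldl_merge_length_eq s0 rest
    refine List.ext_getElem (by simpa using hlenB.symm) ?_
    intro i h1 h2
    have hi : i < pvMinLen (s0 :: rest) := by simpa using h1
    rw [List.getElem_map, List.getElem_range]
    rw [← List.getD_eq_getElem _ _ h2]
    rw [foldl_merge_getD rest s0 i h2]
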